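-- pv_equiv track=rewrite | github.com/mra111/Data-Structure-and-Algorithm-Projects | project2/question3.py | find_max_list
-- ===== SOURCE A (Python) =====
-- def find_max_list (nums, size):
--     result = []
--
--     nums_size = len (nums)
--     result_size = len (result)
--
--     for i in range (nums_size):
--         while (result_size > 0 and result[-1] < nums[i] and size - result_size < nums_size - i):
--             result.pop ()
--             result_size = result_size - 1
--
--         if (result_size < size):
--             result.append (nums[i])
--             result_size = result_size + 1
--
--     return result
-- ===== SOURCE B (Python) =====
-- def find_max_list(nums, size):
--     n = len(nums)
--     k = min(size, n)
--     if k <= 0: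
--         return []
--     result = []
--     start = 0
--     for j in range(k):
--         window = nums[start : n - (k - j) + 1]
--         m = max(window)
--         start = start + window.index(m) + 1
--         result.append(m)
--     return result
-- ===== Notes on version B (the rewrite author's own statement) =====
-- stated objective: alternative
-- what changed: Replaces the single monotonic-stack pass (pop while smaller, capacity-bounded) with k rounds of leftmost-max selection over shrinking windows nums[start : n-(k-j)+1] using max() and list.index().
import Mathlib
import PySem

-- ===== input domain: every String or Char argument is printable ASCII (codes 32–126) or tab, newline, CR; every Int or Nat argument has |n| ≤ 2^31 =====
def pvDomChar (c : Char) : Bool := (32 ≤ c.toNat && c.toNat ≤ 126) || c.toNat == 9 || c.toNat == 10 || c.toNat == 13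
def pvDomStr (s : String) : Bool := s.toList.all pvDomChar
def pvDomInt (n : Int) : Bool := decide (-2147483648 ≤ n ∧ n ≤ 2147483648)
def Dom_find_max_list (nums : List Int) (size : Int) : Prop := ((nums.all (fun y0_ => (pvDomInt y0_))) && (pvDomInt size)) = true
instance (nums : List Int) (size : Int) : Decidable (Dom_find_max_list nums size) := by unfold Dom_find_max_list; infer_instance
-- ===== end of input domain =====

-- B replaces A's monotonic-stack pass with k rounds of leftmost-max selection over shrinking
-- windows (objective: alternative decomposition, similar cost on typical sizes).

-- B replaces A's monotonic-stack pass with repeated leftmost-max selection over shrinking windows.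

-- ===== PORT A =====
-- the inner 'while' loop of A: pop while the stack top is smaller and capacity allows
def popsA (size n i x : Int) (result : List Int) : List Int :=
  if _h : 0 < result.length ∧ PySem.List.pyGetD result (-1) 0 < x ∧
      size - (result.length : Int) < n - i then
    popsA size n i x result.dropLast
  else result
termination_by result.length
decreasing_by simp_all [List.length_dropLast]

def find_max_list (nums : List Int) (size : Int) : List Int :=
  let nums_size : Int := PySem.List.len nums
  (PySem.List.pyRange 0 nums_size 1).foldl (fun result i =>
    let r := popsA size nums_size i (PySem.List.pyGetD nums i 0) result
    if (r.length : Int) < size then r ++ [PySem.List.pyGetD nums i 0] else r) []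

-- ===== PORT B =====
def find_max_list_alt (nums : List Int) (size : Int) : List Int :=
  let n : Int := PySem.List.len nums
  let k : Int := min size n
  if k ≤ 0 then []
  else
    ((PySem.List.pyRange 0 k 1).foldl (fun (s : List Int × Int) j =>
      let window := PySem.List.slice nums (some s.2) (some (n - (k - j) + 1))
      let m := (PySem.List.max? window (fun y => y)).getD 0
      let start := s.2 + (((PySem.List.index? window m).getD 0 : Nat) : Int) + 1
      (s.1 ++ [m], start)) ([], 0)).1

-- ===== PRECONDITION & SPEC =====
def Spec_find_max_list (nums : List Int) (size : Int) (out : List Int) : Prop := out = find_max_list_alt nums size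
instance (nums : List Int) (size : Int) (out : List Int) : Decidable (Spec_find_max_list nums size out) := by unfold Spec_find_max_list; infer_instance

-- ===== CLAIM (what is proved, stated in full; the proofs are below) =====
def Claim_equal_find_max_list : Prop := ∀ (nums : List Int) (size : Int), Dom_find_max_list nums size → Spec_find_max_list nums size (find_max_list nums size)

-- ===== LEMMAS AND PROOFS =====

-- A's loop as structural recursion over the remaining suffix (i = absolute index)
def runA (size n : Int) : Int → List Int → List Int → List Int
  | _, [], r => r
  | i, x :: xs, r =>
    let r2 := popsA size n i x r
    runA size n (i+1) xs (if (r2.length : Int) < size then r2 ++ [x] else r2)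

-- B as head recursion on the number of picks, over the remaining suffix
def pickR : List Int → Nat → List Int
  | _, 0 => []
  | nums, (k+1) =>
    let w := nums.take (nums.length - k)
    let m := (PySem.List.max? w (fun y => y)).getD 0
    let b := (PySem.List.index? w m).getD 0
    m :: pickR (nums.drop (b+1)) k

lemma popsA_mem {size n i x : Int} {r : List Int} {y : Int}
    (hy : y ∈ popsA size n i x r) : y ∈ r := by
  induction r using List.reverseRecOn with
  | nil => rw [popsA] at hy; simp at hy
  | append_singleton s a IH =>
    rw [popsA] at hy
    split at hy
    · rw [List.dropLast_concat] at hy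
      exact List.mem_append_left _ (IH hy)
    · exact hy

lemma popsA_all_lt {size n i x : Int} {r : List Int}
    (hlt : ∀ y ∈ r, y < x) (hcap : size - 1 < n - i) :
    popsA size n i x r = [] := by
  induction r using List.reverseRecOn with
  | nil => rw [popsA]; simp
  | append_singleton s a IH =>
    rw [popsA]
    rw [dif_pos]
    · rw [List.dropLast_concat]
      exact IH (fun y hy => hlt y (List.mem_append_left _ hy))
    · refine ⟨by simp, ?_, ?_⟩
      · rw [PySem.List.pyGetD_neg_one_append_singleton]
        exact hlt a (by simp)
      · have hl : ((s ++ [a]).length : Int) = (s.length : Int) + 1 := by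
          simp
        omega

lemma popsA_shift {size n i x v : Int} {r : List Int}
    (hv : v < x → n - i ≤ size - 1) :
    popsA size n i x (v :: r) = v :: popsA (size-1) n i x r := by
  induction r using List.reverseRecOn with
  | nil =>
    have hval : PySem.List.pyGetD [v] (-1) 0 = v := by
      simpa using PySem.List.pyGetD_neg_one_append_singleton (xs := ([] : List Int)) (x := v) (d := 0)
    have h1 : popsA (size-1) n i x [] = [] := by rw [popsA]; simp
    have h2 : popsA size n i x [v] = [v] := by
      rw [popsA, dif_neg]
      intro h
      have := hv (by rw [hval] at h; exact h.2.1)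
      have := h.2.2
      simp only [List.length_cons, List.length_nil] at this
      omega
    rw [h1, h2]
  | append_singleton s a IH =>
    have hcons : v :: (s ++ [a]) = (v :: s) ++ [a] := by simp
    rw [popsA]
    conv_rhs => rw [popsA]
    by_cases hc : a < x ∧ (size - 1) - ((s ++ [a]).length : Int) < n - i
    · rw [dif_pos, dif_pos]
      · rw [hcons, List.dropLast_concat, List.dropLast_concat]
        exact IH
      · exact ⟨by simp, by rw [PySem.List.pyGetD_neg_one_append_singleton]; exact hc.1, by
          simp only [List.length_append] at hc ⊢; omega⟩
      · refine ⟨by simp, ?_, ?_⟩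
        · rw [hcons, PySem.List.pyGetD_neg_one_append_singleton]; exact hc.1
        · simp only [List.length_cons, List.length_append] at hc ⊢; omega
    · rw [dif_neg, dif_neg]
      · intro h
        apply hc
        refine ⟨?_, ?_⟩
        · simpa using h.2.1
        · have := h.2.2; simp only [List.length_append] at this ⊢; omega
      · intro h
        apply hc
        constructor
        · rw [hcons, PySem.List.pyGetD_neg_one_append_singleton] at h; exact h.2.1
        · have := h.2.2; simp only [List.length_cons, List.length_append] at this ⊢; omega

lemma popsA_reindex {size n i n' i' x : Int} (h : n - i = n' - i') (r : List Int) :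
    popsA size n i x r = popsA size n' i' x r := by
  induction r using List.reverseRecOn with
  | nil =>
    have h1 : popsA size n i x [] = [] := by rw [popsA]; simp
    have h2 : popsA size n' i' x [] = [] := by rw [popsA]; simp
    rw [h1, h2]
  | append_singleton s a IH =>
    rw [popsA]; conv_rhs => rw [popsA]
    rw [h]
    split
    · rw [List.dropLast_concat]; exact IH
    · rfl

lemma runA_append (size n : Int) (p q r : List Int) (i : Int) :
    runA size n i (p ++ q) r = runA size n (i + (p.length : Int)) q (runA size n i p r) := by
  induction p generalizing i r with
  | nil => simp [runA]
  | cons x xs IH =>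
    simp only [List.cons_append, runA, List.length_cons]
    rw [IH]
    congr 1
    push_cast
    ring

lemma runA_all_lt {size n : Int} {v : Int} :
    ∀ (p : List Int) (i : Int) (r : List Int), (∀ y ∈ r, y < v) → (∀ y ∈ p, y < v) →
    ∀ y ∈ runA size n i p r, y < v := by
  intro p
  induction p with
  | nil => intro i r hr _ y hy; exact hr y hy
  | cons x xs IH =>
    intro i r hr hp y hy
    simp only [runA] at hy
    refine IH (i+1) _ ?_ (fun z hz => hp z (List.mem_cons_of_mem _ hz)) y hy
    intro z hz
    split at hz
    · rcases List.mem_append.1 hz with h | h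
      · exact hr z (popsA_mem h)
      · simp at h; subst h; exact hp z (List.mem_cons_self)
    · exact hr z (popsA_mem hz)

lemma runA_shift {size n v : Int} :
    ∀ (p : List Int) (i : Int) (r : List Int),
    (∀ (t : Nat) (x : Int), p[t]? = some x → v < x → n - (i + (t : Int)) ≤ size - 1) →
    runA size n i p (v :: r) = v :: runA (size-1) n i p r := by
  intro p
  induction p with
  | nil => intro i r _; simp [runA]
  | cons x xs IH =>
    intro i r hp
    have h0 : v < x → n - i ≤ size - 1 := by
      intro hvx
      simpa using hp 0 x (by simp) hvx
    simp only [runA, popsA_shift h0]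
    have hlen : ((v :: popsA (size-1) n i x r).length : Int) < size ↔
        ((popsA (size-1) n i x r).length : Int) < size - 1 := by
      simp only [List.length_cons]
      push_cast
      omega
    have hrec : ∀ (r' : List Int),
        runA size n (i+1) xs (v :: r') = v :: runA (size-1) n (i+1) xs r' := by
      intro r'
      apply IH
      intro t y hy hvy
      have := hp (t+1) y (by simpa using hy) hvy
      push_cast at this ⊢
      omega
    by_cases hc : ((popsA (size-1) n i x r).length : Int) < size - 1
    · rw [if_pos (hlen.2 hc), if_pos hc]
      have : (v :: popsA (size-1) n i x r) ++ [x] = v :: (popsA (size-1) n i x r ++ [x]) := by simp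
      rw [this, hrec]
    · rw [if_neg (fun h => hc (hlen.1 h)), if_neg hc, hrec]

lemma runA_reindex {size n n' : Int} :
    ∀ (p : List Int) (i i' : Int) (r : List Int), n - i = n' - i' →
    runA size n i p r = runA size n' i' p r := by
  intro p
  induction p with
  | nil => intro i i' r _; simp [runA]
  | cons x xs IH =>
    intro i i' r h
    simp only [runA, popsA_reindex h]
    exact IH (i+1) (i'+1) _ (by omega)

lemma runA_nonpos {size n : Int} (hs : size ≤ 0) :
    ∀ (p : List Int) (i : Int), runA size n i p [] = [] := by
  intro p
  induction p with
  | nil => intro i; simp [runA]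
  | cons x xs IH =>
    intro i
    have h0 : popsA size n i x [] = [] := by rw [popsA]; simp
    simp only [runA, h0]
    rw [if_neg (by simpa using hs)]
    exact IH (i+1)

lemma bridgeA_gen (size : Int) (nums : List Int) :
    ∀ (d j : Nat), nums.length = j + d → ∀ (r : List Int),
    (PySem.List.pyRange (j : Int) (nums.length : Int) 1).foldl (fun result i =>
      let r2 := popsA size (nums.length : Int) i (PySem.List.pyGetD nums i 0) result
      if (r2.length : Int) < size then r2 ++ [PySem.List.pyGetD nums i 0] else r2) r
    = runA size (nums.length : Int) (j : Int) (nums.drop j) r := by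
  intro d
  induction d with
  | zero =>
    intro j hj r
    rw [PySem.List.pyRange_one_eq_nil (by omega), List.drop_of_length_le (by omega)]
    simp [runA]
  | succ d IH =>
    intro j hj r
    have hjlt : j < nums.length := by omega
    rw [PySem.List.pyRange_one_cons (by exact_mod_cast hjlt)]
    rw [List.drop_eq_getElem_cons hjlt]
    simp only [List.foldl_cons, runA]
    have hget : PySem.List.pyGetD nums (j : Int) 0 = nums[j] := by
      rw [PySem.List.pyGetD_natCast, List.getD_eq_getElem _ _ hjlt]
    rw [hget]
    have : ((j : Int) + 1) = ((j + 1 : Nat) : Int) := by push_cast; ring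
    rw [this, IH (j+1) (by omega)]

lemma bridgeA (size : Int) (nums : List Int) :
    find_max_list nums size = runA size (nums.length : Int) 0 nums [] := by
  unfold find_max_list
  simp only [PySem.List.len_eq]
  have := bridgeA_gen size nums nums.length 0 (by omega) []
  simpa using this

lemma bridgeB_gen (size : Int) (nums : List Int) (n k : Int)
    (hn : n = (nums.length : Int)) (hk : k = min size n) :
    ∀ (d : Nat) (start : Nat) (acc : List Int),
    (d : Int) ≤ k → (start : Int) + d ≤ n →
    ((PySem.List.pyRange (k - d) k 1).foldl
      (fun (s : List Int × Int) j =>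
        let window := PySem.List.slice nums (some s.2) (some (n - (k - j) + 1))
        let m := (PySem.List.max? window (fun y => y)).getD 0
        let start := s.2 + (((PySem.List.index? window m).getD 0 : Nat) : Int) + 1
        (s.1 ++ [m], start)) (acc, (start : Int))).1
    = acc ++ pickR (nums.drop start) d := by
  intro d
  induction d with
  | zero =>
    intro start acc _ _
    rw [PySem.List.pyRange_one_eq_nil (by omega)]
    simp [pickR]
  | succ d IH =>
    intro start acc hd hsn
    rw [PySem.List.pyRange_one_cons (by omega)]
    rw [List.foldl_cons]
    dsimp only
    have hbound : n - (k - (k - ((d+1 : Nat) : Int))) + 1 = n - d := by push_cast; ring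
    rw [hbound]
    have hw : PySem.List.slice nums (some (start : Int)) (some (n - d)) =
        (nums.drop start).take ((nums.drop start).length - d) := by
      rw [PySem.List.slice_toNat _ (by omega) (by omega)]
      have h1 : ((start : Int)).toNat = start := by omega
      have h2 : (n - (d:Int)).toNat = nums.length - d := by omega
      rw [h1, h2]
      congr 1
      simp only [List.length_drop]
      omega
    set w : List Int := (nums.drop start).take ((nums.drop start).length - d) with hwdef
    have hwlen : w.length = nums.length - start - d := by
      simp only [hwdef, List.length_take, List.length_drop]
      omega
    have hwne : w ≠ [] := by
      have : 0 < w.length := by rw [hwlen]; omega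
      exact List.ne_nil_of_length_pos this
    obtain ⟨m, hm⟩ : ∃ m, PySem.List.max? w (fun y => y) = some m := by
      cases hmx : PySem.List.max? w (fun y => y) with
      | none => exact absurd ((PySem.List.max?_eq_none_iff w _).1 hmx) hwne
      | some m => exact ⟨m, rfl⟩
    have hmmem : m ∈ w := PySem.List.max?_mem hm
    obtain ⟨b, hb⟩ : ∃ b, PySem.List.index? w m = some b := by
      cases hbx : PySem.List.index? w m with
      | none => exact absurd hmmem ((PySem.List.index?_eq_none_iff w m).1 hbx)
      | some b => exact ⟨b, rfl⟩
    obtain ⟨hblt, hwb, hfirst⟩ := PySem.List.getElem_of_index?_eq_some hb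
    rw [hw, hm]
    simp only [Option.getD_some]
    rw [hb]
    simp only [Option.getD_some]
    have hcast : (start : Int) + (b : Int) + 1 = ((start + b + 1 : Nat) : Int) := by push_cast; ring
    have hstep : k - ((d+1 : Nat) : Int) + 1 = k - d := by push_cast; ring
    rw [hcast, hstep, IH (start + b + 1) (acc ++ [m]) (by omega) (by
      have hbl : b < w.length := hblt
      rw [hwlen] at hbl
      push_cast
      omega)]
    have hdrop : nums.drop (start + b + 1) = (nums.drop start).drop (b + 1) := by
      rw [List.drop_drop]
      congr 1
    rw [hdrop]
    conv_rhs => rw [pickR]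
    simp only [← hwdef, hm, hb, Option.getD_some, List.append_assoc, List.cons_append,
      List.nil_append]

lemma bridgeB (size : Int) (nums : List Int) :
    find_max_list_alt nums size = pickR nums (min size (nums.length : Int)).toNat := by
  unfold find_max_list_alt
  simp only [PySem.List.len_eq]
  by_cases hk : min size (nums.length : Int) ≤ 0
  · rw [if_pos hk]
    have h0 : (min size (nums.length : Int)).toNat = 0 := by omega
    rw [h0, pickR]
  · rw [if_neg hk]
    have hd : ((min size (nums.length : Int)).toNat : Int) = min size (nums.length : Int) := by omega
    have := bridgeB_gen size nums (nums.length : Int) (min size (nums.length : Int)) rfl rfl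
      (min size (nums.length : Int)).toNat 0 [] (by omega) (by push_cast; omega)
    rw [hd, sub_self] at this
    simpa using this

theorem runA_eq_pickR : ∀ (N : Nat) (nums : List Int) (size : Int), nums.length = N →
    runA size (nums.length : Int) 0 nums [] = pickR nums (min size (nums.length : Int)).toNat := by
  intro N
  induction N using Nat.strong_induction_on with
  | _ N IH =>
  intro nums size hN
  by_cases h0 : min size (nums.length : Int) ≤ 0
  · have ht : (min size (nums.length : Int)).toNat = 0 := by omega
    rw [ht, pickR]
    by_cases hs : size ≤ 0
    · exact runA_nonpos hs nums 0
    · have hnil : nums = [] := by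
        have : (nums.length : Int) ≤ 0 := by omega
        exact List.eq_nil_of_length_eq_zero (by omega)
      subst hnil
      rfl
  · obtain ⟨k'', hk''⟩ : ∃ t, (min size (nums.length : Int)).toNat = t + 1 :=
      ⟨(min size (nums.length : Int)).toNat - 1, by omega⟩
    rw [hk'']
    have hks : (k'' : Int) + 1 ≤ size := by omega
    have hkn : k'' + 1 ≤ nums.length := by omega
    -- the window and its leftmost maximum
    set w : List Int := nums.take (nums.length - k'') with hwdef
    have hwlen : w.length = nums.length - k'' := by
      simp only [hwdef, List.length_take]
      omega
    have hwne : w ≠ [] := List.ne_nil_of_length_pos (by omega)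
    obtain ⟨m, hm⟩ : ∃ m, PySem.List.max? w (fun y => y) = some m := by
      cases hmx : PySem.List.max? w (fun y => y) with
      | none => exact absurd ((PySem.List.max?_eq_none_iff w _).1 hmx) hwne
      | some m => exact ⟨m, rfl⟩
    have hmmem : m ∈ w := PySem.List.max?_mem hm
    have hmax : ∀ y ∈ w, y ≤ m := by
      intro y hy
      exact PySem.List.max?_isMax hm y hy
    obtain ⟨b, hb⟩ : ∃ b, PySem.List.index? w m = some b := by
      cases hbx : PySem.List.index? w m with
      | none => exact absurd hmmem ((PySem.List.index?_eq_none_iff w m).1 hbx)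
      | some b => exact ⟨b, rfl⟩
    obtain ⟨hblt, hwb, hfirst⟩ := PySem.List.getElem_of_index?_eq_some hb
    have hbn : b < nums.length := by omega
    have hnb : nums[b] = m := by
      rw [← hwb]
      simp [hwdef]
    -- either A never hits the capacity guard during the window, or the window is a single cell
    have hcase : size ≤ (nums.length : Int) ∨ b = 0 := by
      by_cases hsn : size ≤ (nums.length : Int)
      · exact Or.inl hsn
      · right
        have : (min size (nums.length : Int)) = (nums.length : Int) := by omega
        omega
    -- all elements strictly before the leftmost max are smaller
    have hpre : ∀ y ∈ nums.take b, y < m := by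
      intro y hy
      obtain ⟨j, hj, rfl⟩ := List.getElem_of_mem hy
      have hjb : j < b := by
        simp only [List.length_take] at hj
        omega
      have hjw : j < w.length := by omega
      have h1 : (nums.take b)[j] = nums[j] := List.getElem_take
      have h2 : w[j] = nums[j] := by simp [hwdef]
      have hle : w[j] ≤ m := hmax _ (List.getElem_mem hjw)
      have hne : w[j] ≠ m := hfirst j hjb
      rw [h1, ← h2]
      omega
    -- decompose nums around the leftmost max
    have hdecomp : nums.take b ++ m :: nums.drop (b+1) = nums := by
      conv_rhs => rw [← List.take_append_drop b nums]
      rw [List.drop_eq_getElem_cons hbn, hnb]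
    suffices h : runA size (nums.length : Int) 0 (nums.take b ++ m :: nums.drop (b+1)) []
        = pickR nums (k'' + 1) by
      rw [hdecomp] at h
      exact h
    rw [runA_append]
    have htb : ((nums.take b).length : Int) = b := by
      simp; omega
    rw [htb, zero_add]
    set S : List Int := runA size (nums.length : Int) 0 (nums.take b) [] with hS
    have hSlt : ∀ y ∈ S, y < m :=
      runA_all_lt (nums.take b) 0 [] (by simp) hpre
    simp only [runA]
    have hpops : popsA size (nums.length : Int) b m S = [] := by
      rcases hcase with hsn | hb0
      · refine popsA_all_lt hSlt ?_
        omega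
      · subst hb0
        have : S = [] := by rw [hS]; rfl
        rw [this, popsA]
        simp
    rw [hpops]
    rw [if_pos (by simp; omega)]
    simp only [List.nil_append]
    -- bottom element m is never popped afterwards: shift to a size-1 run
    rw [runA_shift (nums.drop (b+1)) ((b : Int) + 1) []
      (by
        intro t x hx hmx
        have hidx : (nums.drop (b+1))[t]? = nums[b+1+t]? := by
          rw [List.getElem?_drop]
        rw [hidx] at hx
        have hlt : b+1+t < nums.length := by
          by_contra hge
          rw [List.getElem?_eq_none (by omega)] at hx
          simp at hx
        have hxval : nums[b+1+t] = x := by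
          rw [List.getElem?_eq_getElem hlt] at hx
          exact Option.some.inj hx
        by_cases hin : b+1+t < nums.length - k''
        · exfalso
          have hinw : b+1+t < w.length := by omega
          have : w[b+1+t] = nums[b+1+t] := by simp [hwdef]
          have hxle : x ≤ m := by
            rw [← hxval, ← this]
            exact hmax _ (List.getElem_mem hinw)
          omega
        · omega)]
    -- reindex the tail run to its own length and apply the induction hypothesis
    rw [runA_reindex (n := (nums.length : Int)) (n' := ((nums.drop (b+1)).length : Int))
      (nums.drop (b+1)) ((b:Int)+1) 0 []
      (by simp only [List.length_drop]; omega)]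
    have hrecl : (nums.drop (b+1)).length < N := by
      simp
      omega
    rw [IH (nums.drop (b+1)).length hrecl (nums.drop (b+1)) (size - 1) rfl]
    have hmin : (min (size - 1) ((nums.drop (b+1)).length : Int)).toNat = k'' := by
      have hdl : (nums.drop (b+1)).length = nums.length - (b+1) := by simp
      have hb2 : b < nums.length - k'' := by
        have := hblt
        rw [hwlen] at this
        exact this
      omega
    rw [hmin]
    conv_rhs => rw [pickR]
    simp only [← hwdef, hm, hb, Option.getD_some]

-- ===== VERDICT (by name: the statement is the Claim_ definition above) =====
theorem find_max_list_spec : Claim_equal_find_max_list := by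
  intro nums size _
  unfold Spec_find_max_list
  rw [bridgeA, bridgeB, runA_eq_pickR nums.length nums size rfl]
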